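-- pv_equiv track=rewrite | github.com/BreakCreak/AICL | application/yolo_detector.py | filter_detections_by_actionness
-- ===== SOURCE A (Python) =====
-- from typing import List, Tuple, Dict
--
-- def filter_detections_by_actionness(
--                                   frame_detections: Dict[int, List],
--                                   actionness_segments: List[Tuple[int, int]]) -> Dict[int, List]:
--     """
--     根据actionness时间段过滤检测结果
--     :param frame_detections: 帧检测结果
--     :param actionness_segments: actionness时间段
--     :return: 过滤后的检测结果
--     """
--     filtered_results = {}
--
--     for frame_num, detections in frame_detections.items():
--         # 检查帧号是否在任意actionness时间段内
--         in_actionness_segment = any(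
--             start <= frame_num <= end
--             for start, end in actionness_segments
--         )
--
--         if in_actionness_segment and detections:
--             filtered_results[frame_num] = detections
--
--     return filtered_results
-- ===== SOURCE B (Python) =====
-- def filter_detections_by_actionness(frame_detections, actionness_segments):
--     # Sort segments by start once, precompute the running max of segment ends,
--     # then decide each frame's membership with a binary search over the starts.
--     segs = sorted(actionness_segments, key=lambda p: p[0])
--     starts = [p[0] for p in segs]
--     reach = []
--     m = None
--     for p in segs:
--         if m is None or p[1] > m:
--             m = p[1]
--         reach.append(m)
--     filtered_results = {}
--     for frame_num, detections in frame_detections.items():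
--         lo, hi = 0, len(starts)
--         while lo < hi:
--             mid = (lo + hi) // 2
--             if starts[mid] <= frame_num:
--                 lo = mid + 1
--             else:
--                 hi = mid
--         if lo > 0 and frame_num <= reach[lo - 1] and detections:
--             filtered_results[frame_num] = detections
--     return filtered_results
-- ===== Notes on version B (the rewrite author's own statement) =====
-- stated objective: faster
-- what changed: Replaces A's per-frame linear scan over all segments with sorting the segments once, a precomputed running maximum of segment ends, and a binary search over the sorted starts for each frame.
import Mathlib
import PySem

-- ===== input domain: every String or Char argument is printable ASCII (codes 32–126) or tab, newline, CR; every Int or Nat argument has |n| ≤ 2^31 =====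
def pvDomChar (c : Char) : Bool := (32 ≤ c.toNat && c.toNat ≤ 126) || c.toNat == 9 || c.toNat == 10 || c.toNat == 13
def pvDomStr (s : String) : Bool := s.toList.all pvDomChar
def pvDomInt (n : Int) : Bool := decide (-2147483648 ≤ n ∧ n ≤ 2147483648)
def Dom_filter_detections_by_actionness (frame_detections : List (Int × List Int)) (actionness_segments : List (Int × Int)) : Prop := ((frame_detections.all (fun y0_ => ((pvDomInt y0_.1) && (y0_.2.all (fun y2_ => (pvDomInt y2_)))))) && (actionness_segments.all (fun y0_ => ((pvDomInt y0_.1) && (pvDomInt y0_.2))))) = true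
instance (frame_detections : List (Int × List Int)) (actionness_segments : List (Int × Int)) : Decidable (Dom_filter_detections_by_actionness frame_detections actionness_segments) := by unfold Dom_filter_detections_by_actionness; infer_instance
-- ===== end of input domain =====

-- B replaces A's per-frame scan of all segments by sorting the segments once,
-- a running max of segment ends, and a binary search per frame (alternative algorithm).

-- ===== PORT A =====
def filter_detections_by_actionness (frame_detections : List (Int × List Int)) (actionness_segments : List (Int × Int)) : List (Int × List Int) :=
  let d := PySem.Dict.ofList frame_detections
  (d.items.foldl (fun (acc : PySem.Dict Int (List Int)) fp =>
      let in_actionness_segment := actionness_segments.any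
        (fun se => decide (se.1 ≤ fp.1) && decide (fp.1 ≤ se.2))
      if in_actionness_segment && !fp.2.isEmpty then acc.insert fp.1 fp.2 else acc)
    PySem.Dict.empty).items

-- ===== PORT B =====
-- Source B's hand-written binary search loop (lo, hi), fuel = hi - lo at the call;
-- (lo+hi)//2 is Nat division here, exact since lo, hi are non-negative;
-- starts[mid] is ported as getD (mid is always in range at the call sites).
def pvBsrLoop (xs : List Int) (x : Int) : Nat → Nat → Nat → Nat
  | 0, lo, _ => lo
  | fuel+1, lo, hi =>
    if lo < hi then
      let mid := (lo + hi) / 2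
      if xs.getD mid 0 ≤ x then pvBsrLoop xs x fuel (mid+1) hi
      else pvBsrLoop xs x fuel lo mid
    else lo

def filter_detections_by_actionness_alt (frame_detections : List (Int × List Int)) (actionness_segments : List (Int × Int)) : List (Int × List Int) :=
  let segs := PySem.List.sorted actionness_segments (fun p => p.1) false
  let starts := segs.map (fun p => p.1)
  -- running maximum of segment ends (m is None before the first segment)
  let reach := (segs.foldl (fun (st : Option Int × List Int) p =>
      let m := match st.1 with
        | none => p.2
        | some m0 => if m0 < p.2 then p.2 else m0
      (some m, st.2 ++ [m])) (none, [])).2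
  let d := PySem.Dict.ofList frame_detections
  (d.items.foldl (fun (acc : PySem.Dict Int (List Int)) fp =>
      let lo := pvBsrLoop starts fp.1 starts.length 0 starts.length
      -- reach[lo-1] is only read when lo > 0 (short-circuit `and` in Source B)
      if decide (0 < lo) && decide (fp.1 ≤ reach.getD (lo - 1) 0) && !fp.2.isEmpty
      then acc.insert fp.1 fp.2 else acc)
    PySem.Dict.empty).items

-- ===== PRECONDITION & SPEC =====
def Spec_filter_detections_by_actionness (frame_detections : List (Int × List Int)) (actionness_segments : List (Int × Int)) (out : List (Int × List Int)) : Prop := out = filter_detections_by_actionness_alt frame_detections actionness_segments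
instance (frame_detections : List (Int × List Int)) (actionness_segments : List (Int × Int)) (out : List (Int × List Int)) : Decidable (Spec_filter_detections_by_actionness frame_detections actionness_segments out) := by unfold Spec_filter_detections_by_actionness; infer_instance

-- ===== CLAIM (what is proved, stated in full; the proofs are below) =====
def Claim_equal_filter_detections_by_actionness : Prop := ∀ (frame_detections : List (Int × List Int)) (actionness_segments : List (Int × Int)), Dom_filter_detections_by_actionness frame_detections actionness_segments → Spec_filter_detections_by_actionness frame_detections actionness_segments (filter_detections_by_actionness frame_detections actionness_segments)

-- ===== LEMMAS AND PROOFS =====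

-- binary-search loop invariant: everything left of the result is ≤ x, everything
-- from the result on is > x
lemma pvBsrLoop_spec (xs : List Int) (x : Int)
    (hsort : List.Pairwise (fun a b => a ≤ b) xs) :
    ∀ fuel lo hi, lo ≤ hi → hi ≤ xs.length → hi - lo ≤ fuel →
    (∀ j (hj : j < xs.length), j < lo → xs[j] ≤ x) →
    (∀ j (hj : j < xs.length), hi ≤ j → x < xs[j]) →
    lo ≤ pvBsrLoop xs x fuel lo hi ∧ pvBsrLoop xs x fuel lo hi ≤ hi ∧
    (∀ j (hj : j < xs.length), j < pvBsrLoop xs x fuel lo hi → xs[j] ≤ x) ∧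
    (∀ j (hj : j < xs.length), pvBsrLoop xs x fuel lo hi ≤ j → x < xs[j]) := by
  intro fuel
  induction fuel with
  | zero =>
    intro lo hi hlh hhl hf hlow hhigh
    have : lo = hi := by omega
    subst this
    exact ⟨le_refl _, le_refl _, hlow, hhigh⟩
  | succ n ih =>
    intro lo hi hlh hhl hf hlow hhigh
    by_cases h : lo < hi
    · have hmid : (lo + hi) / 2 < xs.length := by omega
      rw [pvBsrLoop, if_pos h]
      have hget : xs.getD ((lo + hi) / 2) 0 = xs[(lo + hi) / 2] :=
        List.getD_eq_getElem xs 0 hmid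
      by_cases hle : xs.getD ((lo + hi) / 2) 0 ≤ x
      · rw [if_pos hle]
        have hres := ih ((lo + hi) / 2 + 1) hi (by omega) hhl (by omega)
          (fun j hj hjlt => by
            rcases Nat.lt_or_ge j lo with hc | hc
            · exact hlow j hj hc
            · rcases Nat.eq_or_lt_of_le (Nat.le_of_lt_succ hjlt) with he | hl
              · subst he; rw [← hget]; exact hle
              · calc xs[j] ≤ xs[(lo + hi) / 2] :=
                    (List.pairwise_iff_getElem.mp hsort) j _ hj hmid hl
                  _ ≤ x := by rw [← hget]; exact hle)
          hhigh
        obtain ⟨r1, r2, r3, r4⟩ := hres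
        exact ⟨by omega, r2, r3, r4⟩
      · rw [if_neg hle]
        push Not at hle
        rw [hget] at hle
        have hres := ih lo ((lo + hi) / 2) (by omega) (by omega) (by omega)
          hlow
          (fun j hj hjge => by
            rcases Nat.eq_or_lt_of_le hjge with he | hl
            · subst he; exact hle
            · calc x < xs[(lo + hi) / 2] := hle
                _ ≤ xs[j] := (List.pairwise_iff_getElem.mp hsort) _ j hmid hj hl)
        obtain ⟨r1, r2, r3, r4⟩ := hres
        exact ⟨r1, by omega, r3, r4⟩
    · rw [pvBsrLoop, if_neg h]
      have : lo = hi := by omega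
      subst this
      exact ⟨le_refl _, le_refl _, hlow, hhigh⟩

-- clean recursive version of Source B's running-max loop
def pvReachAux (m : Int) : List (Int × Int) → List Int
  | [] => []
  | p :: t => (if m < p.2 then p.2 else m) :: pvReachAux (if m < p.2 then p.2 else m) t

def pvReachL : List (Int × Int) → List Int
  | [] => []
  | p :: t => p.2 :: pvReachAux p.2 t

lemma pvReach_foldl_aux (l : List (Int × Int)) :
    ∀ (m : Int) (acc : List Int),
    (l.foldl (fun (st : Option Int × List Int) p =>
      let m' := match st.1 with
        | none => p.2
        | some m0 => if m0 < p.2 then p.2 else m0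
      (some m', st.2 ++ [m'])) (some m, acc)).2 = acc ++ pvReachAux m l := by
  induction l with
  | nil => intro m acc; simp [pvReachAux]
  | cons p t ih =>
    intro m acc
    simp only [List.foldl_cons, pvReachAux]
    rw [ih]
    simp

lemma pvReach_foldl (l : List (Int × Int)) :
    (l.foldl (fun (st : Option Int × List Int) p =>
      let m' := match st.1 with
        | none => p.2
        | some m0 => if m0 < p.2 then p.2 else m0
      (some m', st.2 ++ [m'])) (none, [])).2 = pvReachL l := by
  cases l with
  | nil => rfl
  | cons p t =>
    simp only [List.foldl_cons, pvReachL]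
    have := pvReach_foldl_aux t p.2 [p.2]
    simpa using this

lemma pvReachAux_length (m : Int) (l : List (Int × Int)) :
    (pvReachAux m l).length = l.length := by
  induction l generalizing m with
  | nil => rfl
  | cons p t ih => simp [pvReachAux, ih]

lemma pvReachL_length (l : List (Int × Int)) : (pvReachL l).length = l.length := by
  cases l with
  | nil => rfl
  | cons p t => simp [pvReachL, pvReachAux_length]

lemma pvReachAux_ge_iff (f : Int) (l : List (Int × Int)) :
    ∀ (m : Int) (i : Nat) (hi : i < l.length),
    f ≤ (pvReachAux m l)[i]'(by rw [pvReachAux_length]; exact hi) ↔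
      f ≤ m ∨ ∃ j, j ≤ i ∧ ∃ hj : j < l.length, f ≤ l[j].2 := by
  induction l with
  | nil => intro m i hi; simp at hi
  | cons p t ih =>
    intro m i hi
    cases i with
    | zero =>
      constructor
      · intro h
        simp only [pvReachAux, List.getElem_cons_zero] at h
        split_ifs at h with hc
        · exact Or.inr ⟨0, le_refl _, by simp, by simpa using h⟩
        · exact Or.inl h
      · intro h
        simp only [pvReachAux, List.getElem_cons_zero]
        rcases h with h | ⟨j, hj0, hjlen, hj⟩
        · split_ifs with hc
          · omega
          · exact h
        · interval_cases j
          simp only [List.getElem_cons_zero] at hj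
          split_ifs with hc
          · exact hj
          · omega
    | succ i' =>
      have hi' : i' < t.length := by simpa using Nat.lt_of_succ_lt_succ hi
      have := ih (if m < p.2 then p.2 else m) i' hi'
      constructor
      · intro h
        simp only [pvReachAux, List.getElem_cons_succ] at h
        rcases this.mp h with h' | ⟨j, hj0, hjlen, hj⟩
        · split_ifs at h' with hc
          · exact Or.inr ⟨0, by omega, by simp, by simpa using h'⟩
          · exact Or.inl h'
        · exact Or.inr ⟨j + 1, by omega, by simpa using Nat.succ_lt_succ hjlen, by simpa using hj⟩
      · intro h
        simp only [pvReachAux, List.getElem_cons_succ]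
        apply this.mpr
        rcases h with h | ⟨j, hj0, hjlen, hj⟩
        · left; split_ifs with hc
          · omega
          · exact h
        · cases j with
          | zero =>
            left
            simp only [List.getElem_cons_zero] at hj
            split_ifs with hc
            · exact hj
            · omega
          | succ j' =>
            right
            exact ⟨j', by omega, by simpa using Nat.lt_of_succ_lt_succ hjlen, by simpa using hj⟩

lemma pvReachL_ge_iff (f : Int) (l : List (Int × Int)) (i : Nat) (hi : i < l.length) :
    f ≤ (pvReachL l)[i]'(by rw [pvReachL_length]; exact hi) ↔
      ∃ j, j ≤ i ∧ ∃ hj : j < l.length, f ≤ l[j].2 := by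
  cases l with
  | nil => simp at hi
  | cons p t =>
    cases i with
    | zero =>
      simp only [pvReachL, List.getElem_cons_zero]
      constructor
      · intro h; exact ⟨0, le_refl _, by simp, by simpa using h⟩
      · rintro ⟨j, hj0, hjlen, hj⟩; interval_cases j; simpa using hj
    | succ i' =>
      have hi' : i' < t.length := by simpa using Nat.lt_of_succ_lt_succ hi
      simp only [pvReachL, List.getElem_cons_succ]
      rw [pvReachAux_ge_iff f t p.2 i' hi']
      constructor
      · rintro (h | ⟨j, hj0, hjlen, hj⟩)
        · exact ⟨0, by omega, by simp, by simpa using h⟩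
        · exact ⟨j + 1, by omega, by simpa using Nat.succ_lt_succ hjlen, by simpa using hj⟩
      · rintro ⟨j, hj0, hjlen, hj⟩
        cases j with
        | zero => left; simpa using hj
        | succ j' =>
          right
          exact ⟨j', by omega, by simpa using Nat.lt_of_succ_lt_succ hjlen, by simpa using hj⟩

-- the two per-frame conditions agree
lemma pv_cond_eq (actionness_segments : List (Int × Int)) (f : Int) :
    (actionness_segments.any (fun se => decide (se.1 ≤ f) && decide (f ≤ se.2)))
    = (let segs := PySem.List.sorted actionness_segments (fun p => p.1) false
       let starts := segs.map (fun p => p.1)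
       let lo := pvBsrLoop starts f starts.length 0 starts.length
       decide (0 < lo) && decide (f ≤ (pvReachL segs).getD (lo - 1) 0)) := by
  simp only []
  set segs := PySem.List.sorted actionness_segments (fun p => p.1) false with hsegs
  set starts := segs.map (fun p => p.1) with hstarts
  have hsort : List.Pairwise (fun a b => a ≤ b) starts := by
    rw [hstarts, List.pairwise_map]
    exact PySem.List.sorted_pairwise actionness_segments (fun p => p.1)
  have hspec := pvBsrLoop_spec starts f hsort starts.length 0 starts.length
    (by omega) (le_refl _) (by omega)
    (fun j hj h => by omega) (fun j hj h => by omega)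
  set lo := pvBsrLoop starts f starts.length 0 starts.length with hlo
  obtain ⟨-, hloLe, hbelow, habove⟩ := hspec
  have hlen : starts.length = segs.length := by rw [hstarts]; simp
  rw [Bool.eq_iff_iff]
  simp only [List.any_eq_true, Bool.and_eq_true, decide_eq_true_eq]
  constructor
  · rintro ⟨se, hmem, h1, h2⟩
    have hmem' : se ∈ segs := (PySem.List.mem_sorted _ _ _ _).mpr hmem
    obtain ⟨j, hjlen, hje⟩ := List.mem_iff_getElem.mp hmem'
    have hjs : j < starts.length := by omega
    have hstart_j : starts[j] = segs[j].1 := by simp only [hstarts, List.getElem_map]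
    have hjlt : j < lo := by
      by_contra hc
      push Not at hc
      have := habove j hjs hc
      rw [hstart_j, hje] at this
      omega
    have hlopos : 0 < lo := by omega
    refine ⟨hlopos, ?_⟩
    have hlo1 : lo - 1 < segs.length := by omega
    rw [List.getD_eq_getElem _ 0 (by rw [pvReachL_length]; exact hlo1)]
    apply (pvReachL_ge_iff f segs (lo - 1) hlo1).mpr
    exact ⟨j, by omega, hjlen, by rw [hje]; exact h2⟩
  · rintro ⟨hlopos, hreach⟩
    have hlo1 : lo - 1 < segs.length := by omega
    rw [List.getD_eq_getElem _ 0 (by rw [pvReachL_length]; exact hlo1)] at hreach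
    obtain ⟨j, hji, hjlen, hj⟩ := (pvReachL_ge_iff f segs (lo - 1) hlo1).mp hreach
    have hjs : j < starts.length := by omega
    have hstart_j : starts[j] = segs[j].1 := by simp only [hstarts, List.getElem_map]
    have h1 : segs[j].1 ≤ f := by
      have := hbelow j hjs (by omega)
      rwa [hstart_j] at this
    refine ⟨segs[j], (PySem.List.mem_sorted _ _ _ _).mp (List.getElem_mem _), h1, hj⟩

-- the two folds agree once their conditions agree pointwise
lemma pv_foldl_eq (condA condB : Int → Bool)
    (h : ∀ f, condA f = condB f) :
    ∀ (items : List (Int × List Int)) (acc : PySem.Dict Int (List Int)),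
    items.foldl (fun acc fp =>
      if condA fp.1 && !fp.2.isEmpty then acc.insert fp.1 fp.2 else acc) acc
    = items.foldl (fun acc fp =>
      if condB fp.1 && !fp.2.isEmpty then acc.insert fp.1 fp.2 else acc) acc := by
  intro items
  induction items with
  | nil => intro acc; rfl
  | cons p t ih =>
    intro acc
    simp only [List.foldl_cons, h p.1]
    exact ih _

-- ===== VERDICT (by name: the statement is the Claim_ definition above) =====
theorem filter_detections_by_actionness_spec : Claim_equal_filter_detections_by_actionness := by
  intro frame_detections actionness_segments _hdom
  unfold Spec_filter_detections_by_actionness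
  unfold filter_detections_by_actionness filter_detections_by_actionness_alt
  simp only []
  rw [pvReach_foldl]
  congr 1
  exact pv_foldl_eq
    (fun f => actionness_segments.any (fun se => decide (se.1 ≤ f) && decide (f ≤ se.2)))
    (fun f =>
      let segs := PySem.List.sorted actionness_segments (fun p => p.1) false
      let starts := segs.map (fun p => p.1)
      let lo := pvBsrLoop starts f starts.length 0 starts.length
      decide (0 < lo) && decide (f ≤ (pvReachL segs).getD (lo - 1) 0))
    (fun f => pv_cond_eq actionness_segments f)
    (PySem.Dict.ofList frame_detections).items PySem.Dict.empty
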